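-- pv_equiv track=rewrite | github.com/khushboo208/my-project | outfit_engine.py | footwear_matches_outfit
-- ===== SOURCE A (Python) =====
-- def normalize(text):
--     return (text or "").strip().lower()
--
-- def footwear_matches_outfit(footwear, outfit, occasion=None):
--     if not footwear:
--         return True
--
--     shoe_article = normalize(footwear.get("article_type"))
--     bottom = outfit.get("bottom")
--     dress = outfit.get("dress")
--
--     if bottom:
--         bottom_article = normalize(bottom.get("article_type"))
--
--         # Hard mismatch rules
--         if any(word in bottom_article for word in ["short", "shorts", "jogger"]):
--             if any(word in shoe_article for word in ["heel", "pump", "stiletto"]):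
--                 return False
--
--         if any(word in bottom_article for word in ["trouser", "pant", "slack", "skirt"]):
--             if occasion in {"formal", "office"} and any(word in shoe_article for word in ["sneaker", "trainer"]):
--                 return False
--
--     if dress:
--         dress_article = normalize(dress.get("article_type"))
--         if "dress" in dress_article and occasion in {"formal", "office"}:
--             if any(word in shoe_article for word in ["flipflop", "sports sandal", "trainer"]):
--                 return False
--
--     return True
-- ===== SOURCE B (Python) =====
-- def normalize(text):
--     return (text or "").strip().lower()
--
-- def forbidden_shoe_words(outfit, occasion):
--     """Derive the list of shoe keywords banned by this outfit/occasion alone."""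
--     words = []
--     bottom = outfit.get("bottom")
--     if bottom:
--         ba = normalize(bottom.get("article_type"))
--         if any(w in ba for w in ("short", "shorts", "jogger")):
--             words += ["heel", "pump", "stiletto"]
--         if occasion in ("formal", "office") and any(w in ba for w in ("trouser", "pant", "slack", "skirt")):
--             words += ["sneaker", "trainer"]
--     dress = outfit.get("dress")
--     if dress and occasion in ("formal", "office"):
--         if "dress" in normalize(dress.get("article_type")):
--             words += ["flipflop", "sports sandal", "trainer"]
--     return words
--
-- def footwear_matches_outfit(footwear, outfit, occasion=None):
--     if not footwear:
--         return True
--     shoe = normalize(footwear.get("article_type"))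
--     return not any(w in shoe for w in forbidden_shoe_words(outfit, occasion))
-- ===== Notes on version B (the rewrite author's own statement) =====
-- stated objective: alternative
-- what changed: B is staged: a first pass derives a blacklist of forbidden shoe keywords from the outfit and occasion alone (accumulated, no early returns and no shoe involved), then a single substring test of the shoe against that blacklist decides; A interleaves shoe tests into three early-return branches.
import Mathlib
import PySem

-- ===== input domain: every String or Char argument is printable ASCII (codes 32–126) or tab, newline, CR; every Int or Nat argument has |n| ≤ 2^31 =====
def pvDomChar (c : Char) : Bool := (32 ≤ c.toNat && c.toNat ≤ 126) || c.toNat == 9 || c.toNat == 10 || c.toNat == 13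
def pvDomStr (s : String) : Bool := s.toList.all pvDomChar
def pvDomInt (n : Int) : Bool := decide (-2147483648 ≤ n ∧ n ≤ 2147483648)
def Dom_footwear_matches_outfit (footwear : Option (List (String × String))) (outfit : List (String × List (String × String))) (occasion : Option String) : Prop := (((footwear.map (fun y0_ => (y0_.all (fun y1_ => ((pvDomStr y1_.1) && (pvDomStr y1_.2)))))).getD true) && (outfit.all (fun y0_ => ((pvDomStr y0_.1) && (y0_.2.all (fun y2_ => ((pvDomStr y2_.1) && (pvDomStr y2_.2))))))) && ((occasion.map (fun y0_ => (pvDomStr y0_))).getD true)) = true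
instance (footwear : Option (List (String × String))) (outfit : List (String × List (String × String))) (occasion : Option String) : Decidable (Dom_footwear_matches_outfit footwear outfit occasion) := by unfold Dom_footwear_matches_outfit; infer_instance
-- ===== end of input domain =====

-- B stages the computation: first derive a blacklist of forbidden shoe keywords from outfit+occasion alone, then one substring test of the shoe against it; same return value as A.

-- ===== PORT A =====
def pyNormalize (t : Option String) : String := PySem.Str.lower (PySem.Str.strip (t.getD ""))

def footwear_matches_outfit (footwear : Option (List (String × String))) (outfit : List (String × List (String × String))) (occasion : Option String) : Bool :=
  match footwear with
  | none => true
  | some fd =>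
    if fd.isEmpty then true
    else
      let shoe_article := pyNormalize ((PySem.Dict.mk fd).get? "article_type")
      let bottom := (PySem.Dict.mk outfit).get? "bottom"
      let dress := (PySem.Dict.mk outfit).get? "dress"
      if (match bottom with
          | none => false
          | some b =>
            if b.isEmpty then false
            else
              let bottom_article := pyNormalize ((PySem.Dict.mk b).get? "article_type")
              ((["short", "shorts", "jogger"].any (fun w => PySem.Str.isIn w bottom_article)) &&
               (["heel", "pump", "stiletto"].any (fun w => PySem.Str.isIn w shoe_article)))
              ||
              ((["trouser", "pant", "slack", "skirt"].any (fun w => PySem.Str.isIn w bottom_article)) &&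
               (occasion == some "formal" || occasion == some "office") &&
               (["sneaker", "trainer"].any (fun w => PySem.Str.isIn w shoe_article))))
      then false
      else if (match dress with
          | none => false
          | some dr =>
            if dr.isEmpty then false
            else
              let dress_article := pyNormalize ((PySem.Dict.mk dr).get? "article_type")
              (PySem.Str.isIn "dress" dress_article) &&
              (occasion == some "formal" || occasion == some "office") &&
              (["flipflop", "sports sandal", "trainer"].any (fun w => PySem.Str.isIn w shoe_article)))
      then false
      else true

-- ===== PORT B =====
def pvForbiddenShoeWords (outfit : List (String × List (String × String))) (occasion : Option String) : List String :=
  let w1 : List String :=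
    match (PySem.Dict.mk outfit).get? "bottom" with
    | none => []
    | some b =>
      if b.isEmpty then []
      else
        let ba := pyNormalize ((PySem.Dict.mk b).get? "article_type")
        (if ["short", "shorts", "jogger"].any (fun w => PySem.Str.isIn w ba)
         then ["heel", "pump", "stiletto"] else []) ++
        (if ((occasion == some "formal" || occasion == some "office") &&
             ["trouser", "pant", "slack", "skirt"].any (fun w => PySem.Str.isIn w ba))
         then ["sneaker", "trainer"] else [])
  let w2 : List String :=
    match (PySem.Dict.mk outfit).get? "dress" with
    | none => []
    | some dr =>
      if (!dr.isEmpty && (occasion == some "formal" || occasion == some "office")) then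
        (if PySem.Str.isIn "dress" (pyNormalize ((PySem.Dict.mk dr).get? "article_type"))
         then ["flipflop", "sports sandal", "trainer"] else [])
      else []
  w1 ++ w2

def footwear_matches_outfit_alt (footwear : Option (List (String × String))) (outfit : List (String × List (String × String))) (occasion : Option String) : Bool :=
  match footwear with
  | none => true
  | some fd =>
    if fd.isEmpty then true
    else
      let shoe := pyNormalize ((PySem.Dict.mk fd).get? "article_type")
      !((pvForbiddenShoeWords outfit occasion).any (fun w => PySem.Str.isIn w shoe))

-- ===== PRECONDITION & SPEC =====
def Spec_footwear_matches_outfit (footwear : Option (List (String × String))) (outfit : List (String × List (String × String))) (occasion : Option String) (out : Bool) : Prop := out = footwear_matches_outfit_alt footwear outfit occasion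
instance (footwear : Option (List (String × String))) (outfit : List (String × List (String × String))) (occasion : Option String) (out : Bool) : Decidable (Spec_footwear_matches_outfit footwear outfit occasion out) := by unfold Spec_footwear_matches_outfit; infer_instance

-- ===== CLAIM (what is proved, stated in full; the proofs are below) =====
def Claim_equal_footwear_matches_outfit : Prop := ∀ (footwear : Option (List (String × String))) (outfit : List (String × List (String × String))) (occasion : Option String), Dom_footwear_matches_outfit footwear outfit occasion → Spec_footwear_matches_outfit footwear outfit occasion (footwear_matches_outfit footwear outfit occasion)

-- ===== LEMMAS AND PROOFS =====

-- ===== VERDICT (by name: the statement is the Claim_ definition above) =====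
theorem footwear_matches_outfit_spec : Claim_equal_footwear_matches_outfit := by
  intro footwear outfit occasion _
  unfold Spec_footwear_matches_outfit footwear_matches_outfit footwear_matches_outfit_alt pvForbiddenShoeWords
  cases footwear with
  | none => rfl
  | some fd =>
    by_cases hfd : fd.isEmpty = true
    · simp [hfd]
    · simp only [hfd, Bool.false_eq_true, if_false]
      set shoe := pyNormalize ((PySem.Dict.mk fd).get? "article_type") with hshoe
      cases hb : (PySem.Dict.mk outfit).get? "bottom" with
      | none =>
        cases hd : (PySem.Dict.mk outfit).get? "dress" with
        | none => rfl
        | some dr =>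
          by_cases hdr : dr.isEmpty = true
          · simp [hdr]
          · simp only [hdr, Bool.false_eq_true, if_false, Bool.not_false, Bool.true_and]
            cases g4 : (occasion == some "formal" || occasion == some "office") <;>
            cases g6 : PySem.Str.isIn "dress" (pyNormalize ((PySem.Dict.mk dr).get? "article_type")) <;>
            cases g7 : (["flipflop","sports sandal","trainer"].any (fun w => PySem.Str.isIn w shoe)) <;>
            simp only [g4, g6, g7, List.any_append, List.any_nil, List.nil_append, List.append_nil,
              eq_self_iff_true, Bool.false_eq_true, if_true, if_false] <;> rfl
      | some b =>
        by_cases hbe : b.isEmpty = true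
        · simp only [hbe, if_true]
          cases hd : (PySem.Dict.mk outfit).get? "dress" with
          | none => rfl
          | some dr =>
            by_cases hdr : dr.isEmpty = true
            · simp [hdr]
            · simp only [hdr, Bool.false_eq_true, if_false, Bool.not_false, Bool.true_and]
              cases g4 : (occasion == some "formal" || occasion == some "office") <;>
              cases g6 : PySem.Str.isIn "dress" (pyNormalize ((PySem.Dict.mk dr).get? "article_type")) <;>
              cases g7 : (["flipflop","sports sandal","trainer"].any (fun w => PySem.Str.isIn w shoe)) <;>
              simp only [g4, g6, g7, List.any_append, List.any_nil, List.nil_append, List.append_nil,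
                eq_self_iff_true, Bool.false_eq_true, if_true, if_false] <;> rfl
        · simp only [hbe, Bool.false_eq_true, if_false]
          set ba := pyNormalize ((PySem.Dict.mk b).get? "article_type") with hba
          cases hd : (PySem.Dict.mk outfit).get? "dress" with
          | none =>
            cases g1 : (["short","shorts","jogger"].any (fun w => PySem.Str.isIn w ba)) <;>
            cases g2 : (["heel","pump","stiletto"].any (fun w => PySem.Str.isIn w shoe)) <;>
            cases g3 : (["trouser","pant","slack","skirt"].any (fun w => PySem.Str.isIn w ba)) <;>
            cases g4 : (occasion == some "formal" || occasion == some "office") <;>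
            cases g5 : (["sneaker","trainer"].any (fun w => PySem.Str.isIn w shoe)) <;>
            simp only [g1, g2, g3, g4, g5, List.any_append, List.any_nil, List.nil_append,
              List.append_nil, eq_self_iff_true, Bool.false_eq_true, if_true, if_false,
              Bool.true_and, Bool.false_and, Bool.and_true, Bool.and_false] <;> rfl
          | some dr =>
            by_cases hdr : dr.isEmpty = true
            · simp only [hdr, if_true]
              cases g1 : (["short","shorts","jogger"].any (fun w => PySem.Str.isIn w ba)) <;>
              cases g2 : (["heel","pump","stiletto"].any (fun w => PySem.Str.isIn w shoe)) <;>
              cases g3 : (["trouser","pant","slack","skirt"].any (fun w => PySem.Str.isIn w ba)) <;>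
              cases g4 : (occasion == some "formal" || occasion == some "office") <;>
              cases g5 : (["sneaker","trainer"].any (fun w => PySem.Str.isIn w shoe)) <;>
              simp only [g1, g2, g3, g4, g5, List.any_append, List.any_nil, List.nil_append,
                List.append_nil, eq_self_iff_true, Bool.false_eq_true, if_true, if_false,
                Bool.true_and, Bool.false_and, Bool.and_true, Bool.and_false] <;> rfl
            · simp only [hdr, Bool.false_eq_true, if_false, Bool.not_false, Bool.true_and]
              cases g1 : (["short","shorts","jogger"].any (fun w => PySem.Str.isIn w ba)) <;>
              cases g2 : (["heel","pump","stiletto"].any (fun w => PySem.Str.isIn w shoe)) <;>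
              cases g3 : (["trouser","pant","slack","skirt"].any (fun w => PySem.Str.isIn w ba)) <;>
              cases g4 : (occasion == some "formal" || occasion == some "office") <;>
              cases g5 : (["sneaker","trainer"].any (fun w => PySem.Str.isIn w shoe)) <;>
              cases g6 : PySem.Str.isIn "dress" (pyNormalize ((PySem.Dict.mk dr).get? "article_type")) <;>
              cases g7 : (["flipflop","sports sandal","trainer"].any (fun w => PySem.Str.isIn w shoe)) <;>
              simp only [g1, g2, g3, g4, g5, g6, g7, List.any_append, List.any_nil, List.nil_append,
                List.append_nil, eq_self_iff_true, Bool.false_eq_true, if_true, if_false,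
                Bool.true_and, Bool.false_and, Bool.and_true, Bool.and_false] <;> rfl
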